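-- pv_equiv track=rewrite | github.com/TahVicentini/BioInfo-Drafts | Fragments from Restriction Enzyme.py | separar_fragmentos
-- ===== SOURCE A (Python) =====
-- def separar_fragmentos(seq_DNA, padrao_enzima):
--   fragmentos = []
--   posicao = seq_DNA.find(padrao_enzima)
--   posicao_anterior = 0
--
--   while posicao != -1:
--     fragmento = seq_DNA[posicao_anterior:posicao]
--     fragmentos.append(fragmento)
--     posicao_anterior = posicao + len(padrao_enzima)
--     posicao = seq_DNA.find(padrao_enzima, posicao + 1)
--
--   fragmento_final = seq_DNA[posicao_anterior:]
--   fragmentos.append(fragmento_final)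
--
--   return fragmentos
-- ===== SOURCE B (Python) =====
-- def separar_fragmentos(seq_DNA, padrao_enzima):
--     # Single left-to-right scan over every position: cut wherever the pattern
--     # starts there, instead of repeated str.find calls.
--     fragmentos = []
--     anterior = 0
--     for i in range(len(seq_DNA) + 1):
--         if seq_DNA.startswith(padrao_enzima, i):
--             fragmentos.append(seq_DNA[anterior:i])
--             anterior = i + len(padrao_enzima)
--     fragmentos.append(seq_DNA[anterior:])
--     return fragmentos
-- ===== Notes on version B (the rewrite author's own statement) =====
-- stated objective: alternative
-- what changed: B replaces A's repeated str.find while-loop by a single scan over every position 0..len that tests str.startswith at each index and cuts where the pattern starts, so no find call and no search-resume position exist.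
import Mathlib
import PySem

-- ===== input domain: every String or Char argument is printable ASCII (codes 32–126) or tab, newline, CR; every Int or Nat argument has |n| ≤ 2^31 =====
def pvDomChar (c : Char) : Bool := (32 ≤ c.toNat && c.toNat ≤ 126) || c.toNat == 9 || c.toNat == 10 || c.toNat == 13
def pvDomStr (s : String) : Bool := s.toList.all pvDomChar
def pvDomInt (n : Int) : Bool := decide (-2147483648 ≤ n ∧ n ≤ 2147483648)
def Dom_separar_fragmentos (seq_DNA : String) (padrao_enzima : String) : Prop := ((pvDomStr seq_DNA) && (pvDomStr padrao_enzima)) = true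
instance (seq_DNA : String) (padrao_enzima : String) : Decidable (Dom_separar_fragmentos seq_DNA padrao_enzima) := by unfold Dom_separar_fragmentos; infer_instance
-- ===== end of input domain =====

-- B replaces A's repeated str.find loop by ONE scan over every position, cutting wherever the
-- pattern starts there ("alternative": same cost, different algorithm for locating the cuts).

-- ===== PORT A =====
-- A's while-loop; fuel is a totality guard only: positions strictly increase and are ≤ len,
-- so len + 2 iterations always suffice and the fuel-0 branch (the loop exit) is never reached.
def sfLoopA (seq pat : String) (fuel : Nat) (frag : List String) (anterior posicao : Int) : List String :=
  match fuel with
  | 0 => frag ++ [PySem.Str.slice seq (some anterior) none]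
  | fuel + 1 =>
    if posicao = -1 then frag ++ [PySem.Str.slice seq (some anterior) none]
    else sfLoopA seq pat fuel (frag ++ [PySem.Str.slice seq (some anterior) (some posicao)])
           (posicao + (PySem.Str.len pat : Int))
           (PySem.Str.findFrom seq pat (posicao + 1) none)

def separar_fragmentos (seq_DNA : String) (padrao_enzima : String) : List String :=
  sfLoopA seq_DNA padrao_enzima ((PySem.Str.len seq_DNA).toNat + 2) [] 0 (PySem.Str.find seq_DNA padrao_enzima)

-- ===== PORT B =====
-- Source B's loop body: 'if seq_DNA.startswith(padrao_enzima, i): append fragment, move anterior'.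
-- Python's startswith(pat, i) for 0 ≤ i ≤ len(s) (the only i the range produces) is exactly
-- "pat is a prefix of s[i:]", transcribed as Chars.startswith on toList.drop i.toNat.
def sfStep (seq pat : String) (acc : List String × Int) (i : Int) : List String × Int :=
  if PySem.Chars.startswith (seq.toList.drop i.toNat) pat.toList then
    (acc.1 ++ [PySem.Str.slice seq (some acc.2) (some i)], i + (PySem.Str.len pat : Int))
  else acc

def separar_fragmentos_alt (seq_DNA : String) (padrao_enzima : String) : List String :=
  let st := (PySem.List.pyRange 0 ((PySem.Str.len seq_DNA : Int) + 1)).foldl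
    (sfStep seq_DNA padrao_enzima) ([], 0)
  st.1 ++ [PySem.Str.slice seq_DNA (some st.2) none]

-- ===== PRECONDITION & SPEC =====
def Spec_separar_fragmentos (seq_DNA : String) (padrao_enzima : String) (out : List String) : Prop := out = separar_fragmentos_alt seq_DNA padrao_enzima
instance (seq_DNA : String) (padrao_enzima : String) (out : List String) : Decidable (Spec_separar_fragmentos seq_DNA padrao_enzima out) := by unfold Spec_separar_fragmentos; infer_instance

-- ===== CLAIM (what is proved, stated in full; the proofs are below) =====
def Claim_equal_separar_fragmentos : Prop := ∀ (seq_DNA : String) (padrao_enzima : String), Dom_separar_fragmentos seq_DNA padrao_enzima → Spec_separar_fragmentos seq_DNA padrao_enzima (separar_fragmentos seq_DNA padrao_enzima)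

-- ===== LEMMAS AND PROOFS =====

-- CPython's find quirk: a start past len(s) yields -1 (even for the empty pattern).
theorem findFrom_past (s p : List Char) (k : Nat) (h : s.length < k) :
    PySem.Chars.findFrom s p (k : Int) none = -1 := by
  simp [PySem.Chars.findFrom]
  intro h2
  omega

-- No occurrence of p at or after position k (k ≤ len) means the scan's test is false at every i ≥ k.
theorem no_prefix_of_findFrom_neg (s p : List Char) (k : Nat) (hk : k ≤ s.length)
    (h : PySem.Chars.findFrom s p (k : Int) none = -1) :
    ∀ i : Nat, k ≤ i → ¬ p <+: s.drop i := by
  intro i hki hpre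
  have hninf := (PySem.Chars.findFrom_natCast_eq_neg_one_iff s p k hk).mp h
  apply hninf
  have hp : p <+: (s.drop k).drop (i - k) := by
    rw [List.drop_drop]
    have heq : k + (i - k) = i := by omega
    rwa [heq]
  exact (PySem.Chars.isIn_iff_infix p (s.drop k)).mp
    ((PySem.Chars.exists_prefix_drop_iff_isIn p (s.drop k)).mp ⟨_, hp⟩)

-- Main invariant: A's find-loop started at search position k equals B's scan over positions k..len.
theorem loop_eq_scan (seq pat : String) :
    ∀ (fuel k : Nat), k ≤ seq.toList.length + 1 → seq.toList.length + 2 - k ≤ fuel →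
    ∀ (frag : List String) (ant : Int),
      sfLoopA seq pat fuel frag ant (PySem.Str.findFrom seq pat (k : Int) none) =
      (let st := (PySem.List.pyRange (k : Int) ((seq.toList.length : Int) + 1)).foldl
          (sfStep seq pat) (frag, ant)
       st.1 ++ [PySem.Str.slice seq (some st.2) none]) := by
  intro fuel
  induction fuel with
  | zero => intro k hk hf; exact absurd hf (by omega)
  | succ f ih =>
    intro k hk hf frag ant
    simp only [PySem.Str.findFrom_eq]
    by_cases hk1 : seq.toList.length + 1 = k
    · -- past the end: find gives -1, the scan range is empty
      subst hk1
      rw [findFrom_past seq.toList pat.toList _ (by omega)]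
      have hr : PySem.List.pyRange ((seq.toList.length + 1 : Nat) : Int) ((seq.toList.length : Int) + 1) = ([] : List Int) := by
        have hc : ((seq.toList.length + 1 : Nat) : Int) = (seq.toList.length : Int) + 1 := by push_cast; ring
        rw [hc]; simp [PySem.List.pyRange]
      rw [hr]
      simp only [sfLoopA, List.foldl_nil, if_true]
    · have hk' : k ≤ seq.toList.length := by omega
      by_cases hne : PySem.Chars.findFrom seq.toList pat.toList (k : Int) none = -1
      · -- no occurrence at or after k: A stops; B's scan is a no-op
        rw [hne]
        have hnp := no_prefix_of_findFrom_neg seq.toList pat.toList k hk' hne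
        have hsc : (PySem.List.pyRange (k : Int) ((seq.toList.length : Int) + 1)).foldl
            (sfStep seq pat) (frag, ant) = (frag, ant) := by
          rw [PySem.List.foldl_congr_mem _ _ (fun acc _ => acc) _ ?_, PySem.List.foldl_ignore]
          intro acc x hx
          obtain ⟨hx1, hx2⟩ := PySem.List.mem_pyRange_one.mp hx
          have hxk : k ≤ x.toNat := by omega
          have hfalse : PySem.Chars.startswith (seq.toList.drop x.toNat) pat.toList = false := by
            by_contra hcon
            exact hnp x.toNat hxk ((PySem.Chars.startswith_iff _ _).mp
              (by revert hcon; cases PySem.Chars.startswith (seq.toList.drop x.toNat) pat.toList <;> simp))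
          simp [sfStep, hfalse]
        simp only [hsc, sfLoopA, if_true]
      · -- first occurrence at m = findFrom k: both sides cut there and continue from m+1
        obtain ⟨hkm, hpre, hmin⟩ := PySem.Chars.findFrom_natCast_spec seq.toList pat.toList k hk' hne
        have hmn : PySem.Chars.findFrom seq.toList pat.toList (k : Int) none ≤ seq.toList.length := by
          rw [PySem.Chars.findFrom_natCast seq.toList pat.toList k hk']
          have hle := PySem.Chars.find_le_length (seq.toList.drop k) pat.toList
          rw [List.length_drop] at hle
          split
          · omega
          · omega
        set m := PySem.Chars.findFrom seq.toList pat.toList (k : Int) none with hmdef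
        clear_value m
        have hm0 : (0 : Int) ≤ m := le_trans (by exact_mod_cast Int.natCast_nonneg k) hkm
        have hmN : ((m.toNat : Nat) : Int) = m := Int.toNat_of_nonneg hm0
        have hmNn : m.toNat ≤ seq.toList.length := by omega
        have hkmN : k ≤ m.toNat := by omega
        -- B: split the scan at m
        have hsplit : PySem.List.pyRange (k : Int) ((seq.toList.length : Int) + 1) =
            PySem.List.pyRange (k : Int) m ++ (m :: PySem.List.pyRange (m + 1) ((seq.toList.length : Int) + 1)) := by
          rw [PySem.List.pyRange_one_append (k : Int) m ((seq.toList.length : Int) + 1) hkm (by omega)]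
          rw [PySem.List.pyRange_one_cons (a := m) (b := (seq.toList.length : Int) + 1) (by omega)]
        have hskip : (PySem.List.pyRange (k : Int) m).foldl (sfStep seq pat) (frag, ant) = (frag, ant) := by
          rw [PySem.List.foldl_congr_mem _ _ (fun acc _ => acc) _ ?_, PySem.List.foldl_ignore]
          intro acc x hx
          obtain ⟨hx1, hx2⟩ := PySem.List.mem_pyRange_one.mp hx
          have hfalse : PySem.Chars.startswith (seq.toList.drop x.toNat) pat.toList = false := by
            by_contra hcon
            exact hmin x.toNat (by omega) (by omega) ((PySem.Chars.startswith_iff _ _).mp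
              (by revert hcon; cases PySem.Chars.startswith (seq.toList.drop x.toNat) pat.toList <;> simp))
          simp [sfStep, hfalse]
        have hhit : sfStep seq pat (frag, ant) m =
            (frag ++ [PySem.Str.slice seq (some ant) (some m)], m + (PySem.Str.len pat : Int)) := by
          have htrue : PySem.Chars.startswith (seq.toList.drop m.toNat) pat.toList = true :=
            (PySem.Chars.startswith_iff _ _).mpr hpre
          simp [sfStep, htrue]
        -- A: one unfolding of the while-loop, then the induction hypothesis at k' = m.toNat + 1
        have hstep : sfLoopA seq pat (f + 1) frag ant m =
            if m = -1 then frag ++ [PySem.Str.slice seq (some ant) none]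
            else sfLoopA seq pat f (frag ++ [PySem.Str.slice seq (some ant) (some m)])
              (m + (PySem.Str.len pat : Int)) (PySem.Str.findFrom seq pat (m + 1) none) := rfl
        have hih := ih (m.toNat + 1) (by omega) (by omega)
          (frag ++ [PySem.Str.slice seq (some ant) (some m)]) (m + (PySem.Str.len pat : Int))
        have hcast1 : ((m.toNat + 1 : Nat) : Int) = m + 1 := by push_cast; omega
        rw [hcast1] at hih
        rw [hstep, if_neg hne, hih, hsplit]
        simp only [List.foldl_append, List.foldl_cons, hskip, hhit]

-- ===== VERDICT (by name: the statement is the Claim_ definition above) =====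
theorem separar_fragmentos_spec : Claim_equal_separar_fragmentos := by
  intro seq pat _
  unfold Spec_separar_fragmentos separar_fragmentos separar_fragmentos_alt
  have h := loop_eq_scan seq pat (seq.toList.length + 2) 0 (by omega) (by omega) [] 0
  simp only [Nat.cast_zero, PySem.Str.findFrom_eq, PySem.Chars.findFrom_zero] at h
  simp only [PySem.Str.len_eq, PySem.Str.find_eq, Int.toNat_natCast]
  exact h
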